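-- pv_equiv track=rewrite | github.com/ViktorKostin/delta-nucmer-converter-to-bam | dnc.py | cigar_compress
-- ===== SOURCE A (Python) =====
-- def cigar_compress(cigar):
--     cigar_new = []
--     for c in cigar:
--         if(len(cigar_new) == 0):
--             cigar_new.append(c)
--         elif(cigar_new[-1][0] == c[0]):
--             cigar_new[-1] = (c[0], cigar_new[-1][1] + c[1])
--         else:
--             cigar_new.append(c)
--             pass
--     return cigar_new
-- ===== SOURCE B (Python) =====
-- def cigar_compress(cigar):
--     out = []
--     i = 0
--     n = len(cigar)
--     while i < n:
--         key = cigar[i][0]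
--         j = i + 1
--         while j < n and cigar[j][0] == key:
--             j += 1
--         if j == i + 1:
--             out.append(cigar[i])
--         else:
--             out.append((key, sum(c[1] for c in cigar[i:j])))
--         i = j
--     return out
-- ===== Notes on version B (the rewrite author's own statement) =====
-- stated objective: alternative
-- what changed: Replaces A's streaming merge that rewrites the output's last slot with a two-pointer run scan: each maximal run of equal operation keys is located first and then emitted once (the original element for a singleton run, otherwise one summed tuple).
import Mathlib
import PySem

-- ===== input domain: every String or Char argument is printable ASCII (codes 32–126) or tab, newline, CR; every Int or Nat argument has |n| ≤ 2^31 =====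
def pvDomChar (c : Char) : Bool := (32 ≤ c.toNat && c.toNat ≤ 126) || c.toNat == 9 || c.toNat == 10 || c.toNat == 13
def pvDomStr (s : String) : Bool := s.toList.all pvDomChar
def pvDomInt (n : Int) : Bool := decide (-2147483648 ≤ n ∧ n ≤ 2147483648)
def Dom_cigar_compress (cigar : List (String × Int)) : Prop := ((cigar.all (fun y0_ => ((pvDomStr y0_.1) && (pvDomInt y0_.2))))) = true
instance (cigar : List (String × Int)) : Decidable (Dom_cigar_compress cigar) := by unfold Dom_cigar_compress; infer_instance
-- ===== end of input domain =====

-- B replaces A's streaming last-slot merge with a two-pointer scan over maximal runs of equal keys (alternative decomposition, same cost).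


-- ===== PORT A =====
-- Literal port of A: fold over the input, merging into the last slot of the accumulator.
def cigar_compress (cigar : List (String × Int)) : List (String × Int) :=
  cigar.foldl
    (fun cigar_new c =>
      if cigar_new.length = 0 then cigar_new ++ [c]
      else if (cigar_new.getLast!).1 = c.1 then
        cigar_new.dropLast ++ [(c.1, (cigar_new.getLast!).2 + c.2)]
      else cigar_new ++ [c])
    []

-- ===== PORT B =====
-- Port of B: outer loop takes one maximal run per step (inner scan = takeWhile/dropWhile),
-- emits the original element for a singleton run, otherwise the key with the run's sum.
def cigarAltGo : List (String × Int) → List (String × Int)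
  | [] => []
  | c :: rest =>
    let run := rest.takeWhile (fun x => x.1 == c.1)
    (if run.isEmpty then c else (c.1, ((c :: run).map Prod.snd).sum))
      :: cigarAltGo (rest.dropWhile (fun x => x.1 == c.1))
termination_by l => l.length
decreasing_by
  simp only [List.length_cons]
  exact Nat.lt_succ_of_le (List.length_dropWhile_le _ _)

def cigar_compress_alt (cigar : List (String × Int)) : List (String × Int) :=
  cigarAltGo cigar

-- ===== PRECONDITION & SPEC =====
def Spec_cigar_compress (cigar : List (String × Int)) (out : List (String × Int)) : Prop := out = cigar_compress_alt cigar
instance (cigar : List (String × Int)) (out : List (String × Int)) : Decidable (Spec_cigar_compress cigar out) := by unfold Spec_cigar_compress; infer_instance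

-- ===== CLAIM (what is proved, stated in full; the proofs are below) =====
def Claim_equal_cigar_compress : Prop := ∀ (cigar : List (String × Int)), Dom_cigar_compress cigar → Spec_cigar_compress cigar (cigar_compress cigar)

-- ===== LEMMAS AND PROOFS =====

-- Streaming characterisation of A: the pending last element merged with the rest.
def mergeRun (p : String × Int) : List (String × Int) → List (String × Int)
  | [] => [p]
  | c :: t => if p.1 = c.1 then mergeRun (p.1, p.2 + c.2) t else p :: mergeRun c t

lemma dropWhile_of_takeWhile_nil {α : Type} (f : α → Bool) (t : List α)
    (he : t.takeWhile f = []) : t.dropWhile f = t := by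
  cases t with
  | nil => rfl
  | cons a s =>
    rw [List.takeWhile_cons] at he
    rw [List.dropWhile_cons]
    split_ifs at he ⊢
    all_goals simp_all

lemma foldlA_concat (l : List (String × Int)) :
    ∀ (acc : List (String × Int)) (p : String × Int),
    l.foldl
      (fun cigar_new c =>
        if cigar_new.length = 0 then cigar_new ++ [c]
        else if (cigar_new.getLast!).1 = c.1 then
          cigar_new.dropLast ++ [(c.1, (cigar_new.getLast!).2 + c.2)]
        else cigar_new ++ [c])
      (acc ++ [p]) = acc ++ mergeRun p l := by
  induction l with
  | nil => intro acc p; simp [mergeRun]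
  | cons c t ih =>
    intro acc p
    rw [List.foldl_cons, mergeRun]
    by_cases h : p.1 = c.1
    · have hstep : (if (acc ++ [p]).length = 0 then (acc ++ [p]) ++ [c]
          else if ((acc ++ [p]).getLast!).1 = c.1 then
            (acc ++ [p]).dropLast ++ [(c.1, ((acc ++ [p]).getLast!).2 + c.2)]
          else (acc ++ [p]) ++ [c]) = acc ++ [(c.1, p.2 + c.2)] := by
        simp [List.getLast!_eq_getLast?_getD, h]
      rw [hstep, ih, if_pos h, h]
    · have hstep : (if (acc ++ [p]).length = 0 then (acc ++ [p]) ++ [c]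
          else if ((acc ++ [p]).getLast!).1 = c.1 then
            (acc ++ [p]).dropLast ++ [(c.1, ((acc ++ [p]).getLast!).2 + c.2)]
          else (acc ++ [p]) ++ [c]) = (acc ++ [p]) ++ [c] := by
        simp [List.getLast!_eq_getLast?_getD, h]
      rw [hstep, ih (acc ++ [p]) c, if_neg h]
      simp

lemma mergeRun_eq_altGo (l : List (String × Int)) :
    ∀ p : String × Int, mergeRun p l = cigarAltGo (p :: l) := by
  induction l with
  | nil => intro p; simp [mergeRun, cigarAltGo]
  | cons c t ih =>
    intro p
    by_cases h : p.1 = c.1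
    · rw [mergeRun, if_pos h, ih]
      rw [cigarAltGo, cigarAltGo]
      simp only [List.takeWhile_cons, List.dropWhile_cons, h, beq_self_eq_true, if_true]
      cases ht : t.takeWhile (fun x => x.1 == c.1) with
      | nil =>
        rw [dropWhile_of_takeWhile_nil _ _ ht]
        simp
      | cons a r =>
        simp [add_assoc]
    · rw [mergeRun, if_neg h, ih]
      conv_rhs => rw [cigarAltGo]
      have hb : ((c.1 == p.1) : Bool) = false := by
        simp [beq_eq_false_iff_ne]; exact fun hc => h hc.symm
      simp [hb]

-- ===== VERDICT (by name: the statement is the Claim_ definition above) =====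
theorem cigar_compress_spec : Claim_equal_cigar_compress := by
  intro cigar _
  unfold Spec_cigar_compress cigar_compress cigar_compress_alt
  cases cigar with
  | nil => simp [cigarAltGo]
  | cons c t =>
    rw [List.foldl_cons]
    have h0 : (if ([] : List (String × Int)).length = 0 then ([] : List (String × Int)) ++ [c]
        else if (([] : List (String × Int)).getLast!).1 = c.1 then
          ([] : List (String × Int)).dropLast ++ [(c.1, (([] : List (String × Int)).getLast!).2 + c.2)]
        else ([] : List (String × Int)) ++ [c]) = [] ++ [c] := by simp
    rw [h0, foldlA_concat, mergeRun_eq_altGo]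
    simp
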